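-- pv_equiv track=rewrite | github.com/pypi-data/pypi-mirror-367 | packages/coppersun-brass/coppersun_brass-2.5.4-py3-none-any.whl/coppersun_brass/agents/scout/analyzers/javascript_analyzer.py | _detect_framework
-- ===== SOURCE A (Python) =====
-- from typing import Dict, List, Any, Optional, Union, Set
--
-- def _detect_framework(imports: List[Dict[str, Any]]) -> str:
--     """Detect JavaScript framework from imports with enhanced detection.
--
--     Args:
--         imports: List of import data
--
--     Returns:
--         Detected framework name
--     """
--     import_sources = [imp.get('source', '') for imp in imports]
--
--     # React family detection
--     react_indicators = ['react', 'react-dom', 'react-native', '@react-native', 'next', 'gatsby']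
--     if any(indicator in src for src in import_sources for indicator in react_indicators):
--         return 'react'
--
--     # Vue family detection
--     vue_indicators = ['vue', '@vue', 'nuxt', 'quasar']
--     if any(indicator in src for src in import_sources for indicator in vue_indicators):
--         return 'vue'
--
--     # Angular family detection
--     angular_indicators = ['@angular', '@ngrx', 'rxjs']
--     if any(indicator in src for src in import_sources for indicator in angular_indicators):
--         return 'angular'
--
--     # Node.js backend frameworks
--     backend_indicators = ['express', 'koa', 'fastify', 'nest', '@nestjs']
--     if any(indicator in src for src in import_sources for indicator in backend_indicators):
--         return 'backend'
--
--     # Testing frameworks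
--     test_indicators = ['jest', 'mocha', 'chai', 'cypress', '@testing-library']
--     if any(indicator in src for src in import_sources for indicator in test_indicators):
--         return 'testing'
--
--     # Build tools and utilities
--     build_indicators = ['webpack', 'vite', 'rollup', 'parcel']
--     if any(indicator in src for src in import_sources for indicator in build_indicators):
--         return 'build-tool'
--
--     return 'vanilla'
-- ===== SOURCE B (Python) =====
-- from typing import Dict, List, Any
--
--
-- _FRAMEWORKS = [
--     ('react', ['react', 'react-dom', 'react-native', '@react-native', 'next', 'gatsby']),
--     ('vue', ['vue', '@vue', 'nuxt', 'quasar']),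
--     ('angular', ['@angular', '@ngrx', 'rxjs']),
--     ('backend', ['express', 'koa', 'fastify', 'nest', '@nestjs']),
--     ('testing', ['jest', 'mocha', 'chai', 'cypress', '@testing-library']),
--     ('build-tool', ['webpack', 'vite', 'rollup', 'parcel']),
-- ]
--
--
-- def _detect_framework(imports: List[Dict[str, Any]]) -> str:
--     """Single pass over the imports, keeping the smallest matching category index."""
--     n = len(_FRAMEWORKS)
--     best = n
--     for imp in imports:
--         src = imp.get('source', '')
--         idx = next((i for i, (_, inds) in enumerate(_FRAMEWORKS)
--                     if any(ind in src for ind in inds)), n)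
--         best = min(best, idx)
--     return _FRAMEWORKS[best][0] if best < n else 'vanilla'
-- ===== Notes on version B (the rewrite author's own statement) =====
-- stated objective: alternative
-- what changed: Transposes the loop nesting: instead of six sequential category cascades each scanning all import sources, B makes a single pass over the sources, computing for each source the first matching category index and maintaining the running minimum, then maps that index to the category name.
import Mathlib
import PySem

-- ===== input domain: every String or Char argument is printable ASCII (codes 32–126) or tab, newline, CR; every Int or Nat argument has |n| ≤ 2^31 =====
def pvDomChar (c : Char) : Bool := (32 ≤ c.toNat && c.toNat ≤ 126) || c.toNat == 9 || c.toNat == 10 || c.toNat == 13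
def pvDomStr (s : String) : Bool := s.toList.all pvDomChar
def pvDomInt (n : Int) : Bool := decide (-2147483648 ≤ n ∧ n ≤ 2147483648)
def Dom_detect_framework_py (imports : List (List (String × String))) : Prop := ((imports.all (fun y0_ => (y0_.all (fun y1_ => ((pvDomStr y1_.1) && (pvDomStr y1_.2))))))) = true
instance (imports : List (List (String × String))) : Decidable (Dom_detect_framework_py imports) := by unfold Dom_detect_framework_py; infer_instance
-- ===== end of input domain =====

-- B replaces A's six sequential category cascades (each scanning all sources) by one pass
-- over the sources maintaining the minimal matching category index (objective: alternative).

-- ===== PORT A =====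
def detect_framework_py (imports : List (List (String × String))) : String :=
  let import_sources := imports.map (fun imp => PySem.Dict.getD (PySem.Dict.mk imp) "source" "")
  let react_indicators := ["react", "react-dom", "react-native", "@react-native", "next", "gatsby"]
  if import_sources.any (fun src => react_indicators.any (fun ind => PySem.Str.isIn ind src)) then "react"
  else
    let vue_indicators := ["vue", "@vue", "nuxt", "quasar"]
    if import_sources.any (fun src => vue_indicators.any (fun ind => PySem.Str.isIn ind src)) then "vue"
    else
      let angular_indicators := ["@angular", "@ngrx", "rxjs"]
      if import_sources.any (fun src => angular_indicators.any (fun ind => PySem.Str.isIn ind src)) then "angular"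
      else
        let backend_indicators := ["express", "koa", "fastify", "nest", "@nestjs"]
        if import_sources.any (fun src => backend_indicators.any (fun ind => PySem.Str.isIn ind src)) then "backend"
        else
          let test_indicators := ["jest", "mocha", "chai", "cypress", "@testing-library"]
          if import_sources.any (fun src => test_indicators.any (fun ind => PySem.Str.isIn ind src)) then "testing"
          else
            let build_indicators := ["webpack", "vite", "rollup", "parcel"]
            if import_sources.any (fun src => build_indicators.any (fun ind => PySem.Str.isIn ind src)) then "build-tool"
            else "vanilla"

-- ===== PORT B =====
def pvFrameworks : List (String × List String) :=
  [ ("react", ["react", "react-dom", "react-native", "@react-native", "next", "gatsby"])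
  , ("vue", ["vue", "@vue", "nuxt", "quasar"])
  , ("angular", ["@angular", "@ngrx", "rxjs"])
  , ("backend", ["express", "koa", "fastify", "nest", "@nestjs"])
  , ("testing", ["jest", "mocha", "chai", "cypress", "@testing-library"])
  , ("build-tool", ["webpack", "vite", "rollup", "parcel"]) ]

def detect_framework_py_alt (imports : List (List (String × String))) : String :=
  let n := pvFrameworks.length
  let best := imports.foldl (fun best imp =>
      let src := PySem.Dict.getD (PySem.Dict.mk imp) "source" ""
      -- next((i for i, (_, inds) in enumerate(_FRAMEWORKS) if any(ind in src ...)), n)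
      let idx := pvFrameworks.findIdx (fun fw => fw.2.any (fun ind => PySem.Str.isIn ind src))
      min best idx) n
  if best < n then (pvFrameworks.getD best ("", [])).1 else "vanilla"

-- ===== PRECONDITION & SPEC =====
def Spec_detect_framework_py (imports : List (List (String × String))) (out : String) : Prop := out = detect_framework_py_alt imports
instance (imports : List (List (String × String))) (out : String) : Decidable (Spec_detect_framework_py imports out) := by unfold Spec_detect_framework_py; infer_instance

-- ===== CLAIM (what is proved, stated in full; the proofs are below) =====
def Claim_equal_detect_framework_py : Prop := ∀ (imports : List (List (String × String))), Dom_detect_framework_py imports → Spec_detect_framework_py imports (detect_framework_py imports)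

-- ===== LEMMAS AND PROOFS =====

-- first index of the first matching category for one source
def pvF (src : String) : Nat :=
  pvFrameworks.findIdx (fun fw => fw.2.any (fun ind => PySem.Str.isIn ind src))

-- first category matched by ANY of the sources
def pvG (srcs : List String) : Nat :=
  pvFrameworks.findIdx (fun fw => srcs.any (fun s => fw.2.any (fun ind => PySem.Str.isIn ind s)))

theorem pv_findIdx_or {α : Type} (p q : α → Bool) (l : List α) :
    l.findIdx (fun x => p x || q x) = min (l.findIdx p) (l.findIdx q) := by
  induction l with
  | nil => simp
  | cons a l ih =>
      cases hp : p a <;> cases hq : q a <;>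
        simp only [List.findIdx_cons, hp, hq, Bool.false_or, Bool.true_or, Bool.or_self,
          cond_true, cond_false, ih] <;> omega

theorem pvG_nil : pvG [] = 6 := by decide

theorem pvG_cons (s : String) (r : List String) : pvG (s :: r) = min (pvF s) (pvG r) := by
  unfold pvG pvF
  have : (fun fw : String × List String => (s :: r).any (fun t => fw.2.any (fun ind => PySem.Str.isIn ind t)))
       = (fun fw : String × List String => (fw.2.any (fun ind => PySem.Str.isIn ind s)) || r.any (fun t => fw.2.any (fun ind => PySem.Str.isIn ind t))) := by
    funext fw; simp [List.any_cons]
  rw [this, pv_findIdx_or]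

theorem pvG_le (srcs : List String) : pvG srcs ≤ 6 := by
  have := List.findIdx_le_length (p := fun fw : String × List String => srcs.any (fun t => fw.2.any (fun ind => PySem.Str.isIn ind t))) (xs := pvFrameworks)
  simpa [pvFrameworks, pvG] using this

theorem pv_fold (srcs : List String) : ∀ (a : Nat), a ≤ 6 →
    srcs.foldl (fun b s => min b (pvF s)) a = min a (pvG srcs) := by
  induction srcs with
  | nil => intro a ha; simp [pvG_nil, Nat.min_eq_left ha]
  | cons s r ih =>
      intro a ha
      have h1 : min a (pvF s) ≤ 6 := le_trans (Nat.min_le_left _ _) ha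
      simp only [List.foldl_cons]
      rw [ih _ h1, pvG_cons, Nat.min_assoc]

def pvExtract (imp : List (String × String)) : String :=
  PySem.Dict.getD (PySem.Dict.mk imp) "source" ""

theorem pv_out (srcs : List String) :
    (if srcs.any (fun src => (["react", "react-dom", "react-native", "@react-native", "next", "gatsby"] : List String).any (fun ind => PySem.Str.isIn ind src)) then "react"
     else if srcs.any (fun src => (["vue", "@vue", "nuxt", "quasar"] : List String).any (fun ind => PySem.Str.isIn ind src)) then "vue"
     else if srcs.any (fun src => (["@angular", "@ngrx", "rxjs"] : List String).any (fun ind => PySem.Str.isIn ind src)) then "angular"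
     else if srcs.any (fun src => (["express", "koa", "fastify", "nest", "@nestjs"] : List String).any (fun ind => PySem.Str.isIn ind src)) then "backend"
     else if srcs.any (fun src => (["jest", "mocha", "chai", "cypress", "@testing-library"] : List String).any (fun ind => PySem.Str.isIn ind src)) then "testing"
     else if srcs.any (fun src => (["webpack", "vite", "rollup", "parcel"] : List String).any (fun ind => PySem.Str.isIn ind src)) then "build-tool"
     else "vanilla")
    = (if pvG srcs < 6 then (pvFrameworks.getD (pvG srcs) ("", [])).1 else "vanilla") := by
  unfold pvG
  simp only [pvFrameworks, List.findIdx_cons]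
  cases h0 : srcs.any (fun src => (["react", "react-dom", "react-native", "@react-native", "next", "gatsby"] : List String).any (fun ind => PySem.Str.isIn ind src)) <;>
  cases h1 : srcs.any (fun src => (["vue", "@vue", "nuxt", "quasar"] : List String).any (fun ind => PySem.Str.isIn ind src)) <;>
  cases h2 : srcs.any (fun src => (["@angular", "@ngrx", "rxjs"] : List String).any (fun ind => PySem.Str.isIn ind src)) <;>
  cases h3 : srcs.any (fun src => (["express", "koa", "fastify", "nest", "@nestjs"] : List String).any (fun ind => PySem.Str.isIn ind src)) <;>
  cases h4 : srcs.any (fun src => (["jest", "mocha", "chai", "cypress", "@testing-library"] : List String).any (fun ind => PySem.Str.isIn ind src)) <;>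
  cases h5 : srcs.any (fun src => (["webpack", "vite", "rollup", "parcel"] : List String).any (fun ind => PySem.Str.isIn ind src)) <;>
    simp only [h0, h1, h2, h3, h4, h5, cond_true, cond_false, if_true, if_false, Bool.false_eq_true,
      if_pos, List.getD] <;> rfl

theorem detect_framework_py_spec : Claim_equal_detect_framework_py := by
  intro imports _
  show detect_framework_py imports = detect_framework_py_alt imports
  have h := pv_fold (imports.map pvExtract) 6 (le_refl 6)
  rw [List.foldl_map] at h
  rw [Nat.min_eq_right (pvG_le _)] at h
  have hB : detect_framework_py_alt imports
      = (if pvG (imports.map pvExtract) < 6 then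
          (pvFrameworks.getD (pvG (imports.map pvExtract)) ("", [])).1 else "vanilla") := by
    rw [show detect_framework_py_alt imports
        = (if (imports.foldl (fun b imp => min b (pvF (pvExtract imp))) 6) < 6 then
            (pvFrameworks.getD (imports.foldl (fun b imp => min b (pvF (pvExtract imp))) 6) ("", [])).1
          else "vanilla") from rfl, h]
  rw [hB]
  exact pv_out (imports.map pvExtract)
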